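-- pv_equiv track=rewrite | github.com/HyunwooYou/Coding-Test | 연습장/202301/18_수/8. 하샤드 수.py | solution
-- ===== SOURCE A (Python) =====
-- def solution(x):
--     arr = list(str(x))
--     sum = 0
--     answer = True
--
--     for i in range(len(arr)):
--         sum = sum + int(arr[i])
--
--     if x % sum == 0:
--         answer = True
--     else:
--         answer = False
--
--     return answer
-- ===== SOURCE B (Python) =====
-- def solution(x):
--     s = 0
--     n = x
--     while n > 0:
--         s += n % 10
--         n //= 10
--     return x % s == 0
-- ===== Notes on version B (the rewrite author's own statement) =====
-- stated objective: alternative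
-- what changed: Computes the digit sum arithmetically with a division loop on the number itself instead of building a list of string characters and re-parsing each character with int(), and returns the comparison directly instead of via an if/else on an answer flag.
import Mathlib
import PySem

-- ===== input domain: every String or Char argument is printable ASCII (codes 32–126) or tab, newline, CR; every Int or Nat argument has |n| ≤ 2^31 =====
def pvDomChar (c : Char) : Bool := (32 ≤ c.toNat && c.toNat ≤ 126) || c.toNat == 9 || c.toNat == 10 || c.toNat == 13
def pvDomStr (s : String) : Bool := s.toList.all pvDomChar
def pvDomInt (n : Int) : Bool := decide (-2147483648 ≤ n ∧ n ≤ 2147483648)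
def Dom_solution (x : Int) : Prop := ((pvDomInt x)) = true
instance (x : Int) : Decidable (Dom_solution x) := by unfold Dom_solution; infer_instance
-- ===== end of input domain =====

-- B replaces the string/list digit traversal by an arithmetic division loop; same return value on x > 0.

-- ===== PORT A =====
-- int(arr[i]): arr[i] is always in range under the loop, so pyGetD's default is never used.
def solution (x : Int) : Bool :=
  let arr := (PySem.Int.toStr x).toList
  let sum : Int := (PySem.List.pyRange 0 (PySem.List.len arr)).foldl
      (fun s i => s + (PySem.Int.ofChars? [PySem.List.pyGetD arr i ' ']).getD 0) 0
  if PySem.Int.mod x sum = 0 then true else false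

-- ===== PORT B =====
-- while n > 0: s += n % 10; n //= 10
def solutionAltLoop (n s : Int) : Int :=
  if 0 < n then solutionAltLoop (PySem.Int.floordiv n 10) (s + PySem.Int.mod n 10) else s
termination_by n.toNat
decreasing_by
  rw [PySem.Int.floordiv_eq_ediv_of_pos (by omega)]
  omega

def solution_alt (x : Int) : Bool :=
  let s := solutionAltLoop x 0
  decide (PySem.Int.mod x s = 0)

-- ===== PRECONDITION & SPEC =====
-- Pre_ excludes exactly the non-positive inputs, on which A raises (a ZeroDivisionError
-- when the digit sum is empty, a ValueError parsing the minus sign); B raises there too.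
def Pre_solution (x : Int) : Prop := 0 < x
instance (x : Int) : Decidable (Pre_solution x) := by unfold Pre_solution; infer_instance
def pvWitness_solution : Int := 18

def Spec_solution (x : Int) (out : Bool) : Prop := out = solution_alt x
instance (x : Int) (out : Bool) : Decidable (Spec_solution x out) := by unfold Spec_solution; infer_instance

-- ===== CLAIM (what is proved, stated in full; the proofs are below) =====
def Claim_equal_solution : Prop := ∀ (x : Int), Dom_solution x → Pre_solution x → Spec_solution x (solution x)

-- ===== LEMMAS AND PROOFS =====

-- value of one character as Python's int() parses it (0 on failure; never hit on digits)
def charVal (c : Char) : Int := (PySem.Int.ofChars? [c]).getD 0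

-- the digit sum of a natural number, as an Int
def digitSum (n : Nat) : Int :=
  if n = 0 then 0 else ((n % 10 : Nat) : Int) + digitSum (n / 10)

lemma charVal_digitChar (d : Nat) (hd : d < 10) : charVal (Nat.digitChar d) = (d : Int) := by
  interval_cases d <;> decide

lemma sum_toDigitsCore (fuel : Nat) :
    ∀ (n : Nat) (ds : List Char), n < fuel →
      ((Nat.toDigitsCore 10 fuel n ds).map charVal).sum = digitSum n + (ds.map charVal).sum := by
  induction fuel with
  | zero => intro n ds h; omega
  | succ fuel ih =>
    intro n ds h
    rw [Nat.toDigitsCore]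
    by_cases h0 : n / 10 = 0
    · rw [if_pos h0]
      rw [digitSum]
      by_cases hn : n = 0
      · subst hn; simp [charVal_digitChar 0 (by omega)]
      · rw [if_neg hn, h0, digitSum, if_pos rfl]
        simp [charVal_digitChar (n % 10) (Nat.mod_lt _ (by omega))]
    · rw [if_neg h0]
      have hn : 10 ≤ n := by omega
      have : n / 10 < fuel := by omega
      rw [ih (n / 10) _ this]
      have hd : digitSum n = ((n % 10 : Nat) : Int) + digitSum (n / 10) := by
        rw [digitSum, if_neg (by omega)]
      simp [charVal_digitChar (n % 10) (Nat.mod_lt _ (by omega)), hd]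
      ring

lemma solutionAltLoop_eq (n : Nat) : ∀ (m s : Int), m.toNat = n → 0 ≤ m →
    solutionAltLoop m s = s + digitSum n := by
  induction n using Nat.strong_induction_on with
  | _ n ih =>
    intro m s hmn hm
    rw [solutionAltLoop]
    by_cases hpos : 0 < m
    · rw [if_pos hpos]
      have h10 : (0:Int) < 10 := by omega
      rw [PySem.Int.floordiv_eq_ediv_of_pos h10, PySem.Int.mod_eq_emod_of_pos h10]
      have hlt : (m / 10).toNat < n := by omega
      rw [ih (m / 10).toNat hlt (m / 10) _ rfl (by omega)]
      have hd : digitSum n = ((n % 10 : Nat) : Int) + digitSum (n / 10) := by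
        rw [digitSum, if_neg (by omega)]
      have h1 : m % 10 = ((n % 10 : Nat) : Int) := by omega
      have h2 : (m / 10).toNat = n / 10 := by omega
      rw [hd, h1, h2]; ring
    · rw [if_neg hpos]
      have : n = 0 := by omega
      subst this
      rw [digitSum, if_pos rfl]; ring

lemma sums_agree (x : Int) (hx : 0 < x) :
    (((PySem.Int.toStr x).toList).map charVal).sum = solutionAltLoop x 0 := by
  rw [PySem.Int.toList_toStr, PySem.Int.toChars, if_neg (by omega), Nat.toDigits]
  rw [sum_toDigitsCore (x.toNat + 1) x.toNat [] (by omega)]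
  rw [solutionAltLoop_eq x.toNat x 0 rfl (by omega)]
  simp

-- ===== VERDICT (by name: the statement is the Claim_ definition above) =====
theorem solution_spec : Claim_equal_solution := by
  intro x _ hx
  unfold Spec_solution solution solution_alt
  dsimp only
  have h := PySem.List.foldl_pyRange_pyGetD ((PySem.Int.toStr x).toList) ' '
      (fun s c => s + charVal c) 0 (a := 0) (by omega)
  simp only [charVal, Int.toNat_zero, List.drop_zero] at h
  rw [h]
  have h2 := PySem.List.foldl_add ((PySem.Int.toStr x).toList) charVal 0
  simp only [charVal] at h2
  rw [h2, zero_add]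
  have h3 := sums_agree x hx
  rw [h3]
  by_cases h : PySem.Int.mod x (solutionAltLoop x 0) = 0 <;> simp [h]
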